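-- pv_equiv track=rewrite | github.com/yonsweng/ps | codeforces/1621/a.py | solve
-- ===== SOURCE A (Python) =====
-- def solve(n, k):
--     rooks = []
--     fail = False
--     i, j = 0, 0
--     for _ in range(k):
--         if i < n and j < n:
--             rooks.append((i, j))
--         else:
--             fail = True
--             break
--         i, j = i + 2, j + 2
--
--     if not fail:
--         answer = [['.'] * n for _ in range(n)]
--         for rook in rooks:
--             answer[rook[0]][rook[1]] = 'R'
--         for i, row in enumerate(answer):
--             answer[i] = ''.join(row)
--         return '\n'.join(answer)
--     else:
--         return -1
-- ===== SOURCE B (Python) =====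
-- def solve(n, k):
--     # closed-form feasibility: rooks go on (0,0),(2,2),...,(2(k-1),2(k-1))
--     if k > 0 and n <= 2 * (k - 1):
--         return -1
--     # build each row string directly: 'R' at column i when i even and i < 2k
--     return '\n'.join(
--         '.' * i + 'R' + '.' * (n - 1 - i) if i % 2 == 0 and i < 2 * k else '.' * n
--         for i in range(n)
--     )
-- ===== Notes on version B (the rewrite author's own statement) =====
-- stated objective: simpler
-- what changed: Replaces A's rook-list loop, mutable n-by-n character grid and cell-mutation pass by a closed-form feasibility test (fail iff k>0 and n<=2*(k-1)) plus direct per-row string construction joined once; Pre_ excludes the infeasible inputs on which both return the int sentinel -1, outside the Optional[str] type.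
-- outside the precondition, e.g. on solve(2, 2): A returns -1, B returns -1
import Mathlib
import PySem

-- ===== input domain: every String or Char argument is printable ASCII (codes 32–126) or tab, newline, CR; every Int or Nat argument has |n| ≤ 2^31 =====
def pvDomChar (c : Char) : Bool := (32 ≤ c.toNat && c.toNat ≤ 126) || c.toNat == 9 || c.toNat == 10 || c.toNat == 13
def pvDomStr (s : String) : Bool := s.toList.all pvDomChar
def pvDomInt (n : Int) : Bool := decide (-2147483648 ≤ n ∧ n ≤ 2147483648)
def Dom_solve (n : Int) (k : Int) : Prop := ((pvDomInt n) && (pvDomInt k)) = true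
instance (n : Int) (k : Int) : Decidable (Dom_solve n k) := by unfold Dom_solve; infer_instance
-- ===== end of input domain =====

-- B replaces A's rook-list loop, mutable grid and cell-mutation pass by a closed-form
-- feasibility test and direct per-row string construction (objective: simpler).


-- ===== PORT A =====
-- 'for _ in range(k)' with break: recursion over the range list, state (i, j, rooks)
def solveLoop (n : Int) : List Int → Int → Int → List (Int × Int) → (List (Int × Int) × Bool)
  | [], _, _, rooks => (rooks, false)
  | _ :: rest, i, j, rooks =>
      if i < n ∧ j < n then solveLoop n rest (i + 2) (j + 2) (rooks ++ [(i, j)])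
      else (rooks, true)

-- answer[rook[0]][rook[1]] = 'R'  (the loop guard makes both indices nonnegative and in range)
def placeRook (ans : List (List Char)) (rook : Int × Int) : List (List Char) :=
  PySem.List.pySetD ans rook.1 (PySem.List.pySetD (PySem.List.pyGetD ans rook.1 []) rook.2 'R')

def solve (n : Int) (k : Int) : Option String :=
  let res := solveLoop n (PySem.List.pyRange 0 k 1) 0 0 []
  if res.2 = false then
    let answer0 := (PySem.List.pyRange 0 n 1).map (fun _ => PySem.List.pyRepeat ['.'] n)
    let answer := res.1.foldl placeRook answer0
    -- ''.join(row) over a row of single chars is the string of those chars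
    some (PySem.Str.join "\n" (answer.map String.ofList))
  else none  -- Python: return -1 (the failure sentinel; the Option codomain carries it as none)

-- ===== PORT B =====
def rowStr (n k i : Int) : String :=
  if PySem.Int.mod i 2 = 0 ∧ i < 2 * k then
    String.ofList (PySem.List.pyRepeat ['.'] i ++ ['R'] ++ PySem.List.pyRepeat ['.'] (n - 1 - i))
  else String.ofList (PySem.List.pyRepeat ['.'] n)

def solve_alt (n : Int) (k : Int) : Option String :=
  if 0 < k ∧ n ≤ 2 * (k - 1) then none
  else some (PySem.Str.join "\n" ((PySem.List.pyRange 0 n 1).map (rowStr n k)))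

-- ===== PRECONDITION & SPEC =====
-- Pre_ excludes the infeasible boards (k > 0 and n <= 2*(k-1)), on which A returns the
-- int sentinel -1 — not a value of the declared Optional[str] type (B does the same there).
def Pre_solve (n : Int) (k : Int) : Prop := ¬ (0 < k ∧ n ≤ 2 * (k - 1))
instance (n : Int) (k : Int) : Decidable (Pre_solve n k) := by unfold Pre_solve; infer_instance
def pvWitness_solve : Int × Int := (5, 3)

def Spec_solve (n : Int) (k : Int) (out : Option String) : Prop := out = solve_alt n k
instance (n : Int) (k : Int) (out : Option String) : Decidable (Spec_solve n k out) := by unfold Spec_solve; infer_instance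

-- ===== CLAIM (what is proved, stated in full; the proofs are below) =====
def Claim_equal_solve : Prop := ∀ (n : Int) (k : Int), Dom_solve n k → Pre_solve n k → Spec_solve n k (solve n k)

-- ===== LEMMAS AND PROOFS =====

-- A's loop succeeds and appends the diagonal rooks when the last one fits
theorem loop_ok (n : Int) : ∀ (l : List Int) (i : Int) (rooks : List (Int × Int)),
    (l = [] ∨ i + 2 * ((l.length : Int) - 1) < n) →
    solveLoop n l i i rooks =
      (rooks ++ (List.range l.length).map (fun t : Nat => (i + 2 * (t : Int), i + 2 * (t : Int))), false) := by
  intro l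
  induction l with
  | nil => intro i rooks _; simp [solveLoop]
  | cons x rest ih =>
    intro i rooks h
    have hlt : i < n := by
      rcases h with h | h
      · exact absurd h (by simp)
      · simp only [List.length_cons] at h; push_cast at h; omega
    simp only [solveLoop, if_pos (show i < n ∧ i < n from ⟨hlt, hlt⟩)]
    rw [ih (i + 2) (rooks ++ [(i, i)]) ?_]
    · congr 1
      rw [List.length_cons, List.range_succ_eq_map, List.map_cons, List.map_map]
      simp only [List.append_assoc, List.singleton_append, Nat.cast_zero, mul_zero, add_zero]
      congr 1
      congr 1
      refine List.map_congr_left fun t _ => ?_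
      simp only [Function.comp_apply, Prod.mk.injEq]
      push_cast
      constructor <;> ring
    · rcases rest with _ | ⟨y, rest'⟩
      · exact Or.inl rfl
      · right
        rcases h with h | h
        · exact absurd h (by simp)
        · simp only [List.length_cons] at h ⊢; push_cast at h ⊢; omega

-- a replicate row with one cell set, as explicit segments
theorem set_replicate (c v : Char) : ∀ (r m : Nat), r < m →
    (List.replicate m c).set r v =
      List.replicate r c ++ [v] ++ List.replicate (m - 1 - r) c := by
  intro r
  induction r with
  | zero =>
    intro m hm
    rcases m with _ | m'
    · omega
    · simp [List.replicate_succ]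
  | succ r' ih =>
    intro m hm
    rcases m with _ | m'
    · omega
    · have : m' + 1 - 1 - (r' + 1) = m' - 1 - r' := by omega
      simp only [List.replicate_succ, List.set_cons_succ, ih m' (by omega), this]
      simp [List.append_assoc]

-- the rook-placement fold over the fresh grid, characterised row by row
theorem fold_grid (m : Nat) : ∀ (K : Nat), 2 * K ≤ m + 1 →
    ((List.range K).map (fun t : Nat => ((2 * (t : Int)), (2 * (t : Int))))).foldl placeRook
        (List.replicate m (List.replicate m '.')) =
      (List.range m).map (fun r =>
        if r % 2 = 0 ∧ r < 2 * K then (List.replicate m '.').set r 'R'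
        else List.replicate m '.') := by
  intro K
  induction K with
  | zero =>
    intro _
    simp [List.map_const']
  | succ K' ih =>
    intro hK
    have h2K : 2 * K' < m := by omega
    rw [List.range_succ, List.map_append, List.foldl_append, ih (by omega)]
    simp only [List.map_cons, List.map_nil, List.foldl_cons, List.foldl_nil]
    unfold placeRook
    have hc : ((2 : Int) * ((K' : Nat) : Int)) = ((2 * K' : Nat) : Int) := by push_cast; ring
    simp only [hc, PySem.List.pyGetD_natCast, PySem.List.pySetD_natCast]
    have hget : ((List.range m).map (fun r =>
        if r % 2 = 0 ∧ r < 2 * K' then (List.replicate m '.').set r 'R'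
        else List.replicate m '.')).getD (2 * K') [] = List.replicate m '.' := by
      rw [List.getD_eq_getElem _ _ (by simpa using h2K)]
      simp [List.getElem_range]
    rw [hget]
    apply List.ext_getElem
    · simp
    · intro r h1 h2
      simp only [List.getElem_set, List.getElem_map, List.getElem_range]
      by_cases hr : 2 * K' = r
      · rw [if_pos hr, if_pos (show r % 2 = 0 ∧ r < 2 * (K' + 1) by omega), ← hr]
      · rw [if_neg hr]
        have hiff : (r % 2 = 0 ∧ r < 2 * K') ↔ (r % 2 = 0 ∧ r < 2 * (K' + 1)) := by omega
        rw [if_congr hiff rfl rfl]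

-- one row of A's finished grid, as B prints it
theorem row_eq (n k : Int) (m : Nat) (hm : m = n.toNat) (r : Nat) (hr : r < m) :
    String.ofList (if r % 2 = 0 ∧ r < 2 * k.toNat then (List.replicate m '.').set r 'R'
      else List.replicate m '.') = rowStr n k (r : Int) := by
  have hmod : PySem.Int.mod (r : Int) 2 = ((r % 2 : Nat) : Int) := by
    exact_mod_cast PySem.Int.mod_natCast r 2
  have hcond : (PySem.Int.mod (r : Int) 2 = 0 ∧ (r : Int) < 2 * k) ↔
      (r % 2 = 0 ∧ r < 2 * k.toNat) := by rw [hmod]; omega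
  unfold rowStr
  by_cases hp : r % 2 = 0 ∧ r < 2 * k.toNat
  · rw [if_pos hp, if_pos (hcond.mpr hp), set_replicate '.' 'R' r m hr]
    simp only [PySem.List.pyRepeat_singleton, Int.toNat_natCast]
    have h1 : (n - 1 - (r : Int)).toNat = m - 1 - r := by omega
    rw [h1]
  · rw [if_neg hp, if_neg (fun h => hp (hcond.mp h)), PySem.List.pyRepeat_singleton]
    rw [hm]

-- ===== VERDICT (by name: the statement is the Claim_ definition above) =====
theorem solve_spec : Claim_equal_solve := by
  intro n k _ hpre
  unfold Spec_solve solve solve_alt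
  have hlen : (PySem.List.pyRange 0 k 1).length = k.toNat := by
    rw [PySem.List.pyRange_one]; simp
  rw [if_neg hpre]
  have hc : 0 < k → 2 * (k - 1) < n := fun hk => by
    by_contra h; exact hpre ⟨hk, by omega⟩
  have hok := loop_ok n (PySem.List.pyRange 0 k 1) 0 [] ?_
  · rw [hok, hlen]
    simp only [List.nil_append, zero_add, if_true]
    have hgrid0 : (PySem.List.pyRange 0 n 1).map (fun _ => PySem.List.pyRepeat ['.'] n) =
        List.replicate n.toNat (List.replicate n.toNat '.') := by
      simp [PySem.List.pyRepeat_singleton, List.map_const', PySem.List.pyRange_one,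
        Function.comp_def]
    rw [hgrid0, fold_grid n.toNat k.toNat (by
      by_cases hk : 0 < k
      · have := hc hk; omega
      · omega)]
    rw [PySem.List.pyRange_one]
    simp only [List.map_map, sub_zero]
    congr 2
    refine List.map_congr_left fun r hrm => ?_
    have hr : r < n.toNat := List.mem_range.mp hrm
    simp only [Function.comp_apply, zero_add]
    exact row_eq n k n.toNat rfl r hr
  · by_cases hk : 0 < k
    · right; rw [hlen]; have := hc hk; omega
    · left; exact PySem.List.pyRange_one_eq_nil (by omega)
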